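-- pv_equiv track=rewrite | github.com/EverlightVentures/everlight-ventures | 06_DEVELOPMENT/everlight_os/modules/content_engine/researcher.py | _extract_structured
-- ===== SOURCE A (Python) =====
-- def _extract_structured(raw: str, topic: str) -> dict:
--     """Extract structured data from raw research text."""
--     # Simple extraction — key points and sources
--     lines = raw.split("\n")
--     key_points = []
--     sources = []
--
--     in_sources = False
--     for line in lines:
--         line = line.strip()
--         if not line:
--             continue
--         if "source" in line.lower() or "reference" in line.lower() or "citation" in line.lower():
--             in_sources = True
--             continue
--         if in_sources and (line.startswith("http") or line[0].isdigit()):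
--             sources.append(line)
--         elif line.startswith(("-", "*", "•")) and not in_sources:
--             key_points.append(line.lstrip("-*• "))
--
--     return {
--         "key_points": key_points[:15],
--         "sources": sources[:10],
--     }
-- ===== SOURCE B (Python) =====
-- def _extract_structured(raw: str, topic: str) -> dict:
--     """Extract structured data from raw research text."""
--     lines = [l.strip() for l in raw.split("\n")]
--
--     def has_kw(line):
--         low = line.lower()
--         return "source" in low or "reference" in low or "citation" in low
--
--     # pivot = index of the first keyword line (len(lines) if none)
--     pivot = next((i for i, l in enumerate(lines) if has_kw(l)), len(lines))
--
--     key_points = [l.lstrip("-*• ") for l in lines[:pivot]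
--                   if l.startswith(("-", "*", "•"))]
--     sources = [l for l in lines[pivot + 1:]
--                if not has_kw(l) and (l.startswith("http") or (l and l[0].isdigit()))]
--
--     return {"key_points": key_points[:15], "sources": sources[:10]}
-- ===== Notes on version B (the rewrite author's own statement) =====
-- stated objective: alternative
-- what changed: Replaces the single stateful loop with a latched in_sources flag by a pivot-index decomposition: find the first keyword line, then build key_points by a filter over the lines before it and sources by a filter over the lines after it.
import Mathlib
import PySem

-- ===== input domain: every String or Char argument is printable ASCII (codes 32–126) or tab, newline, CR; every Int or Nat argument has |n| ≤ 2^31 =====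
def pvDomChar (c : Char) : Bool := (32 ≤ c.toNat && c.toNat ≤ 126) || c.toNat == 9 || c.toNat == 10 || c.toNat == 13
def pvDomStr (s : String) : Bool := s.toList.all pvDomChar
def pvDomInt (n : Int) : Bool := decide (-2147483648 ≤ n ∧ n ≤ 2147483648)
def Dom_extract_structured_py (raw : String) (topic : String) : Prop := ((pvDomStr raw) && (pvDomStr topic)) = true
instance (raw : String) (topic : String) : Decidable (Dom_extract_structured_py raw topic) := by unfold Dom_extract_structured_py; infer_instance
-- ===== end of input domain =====

-- B replaces A's latched in_sources flag by a pivot-index decomposition: locate the first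
-- keyword line, then build key_points / sources by filters over the lines before / after it
-- (objective: alternative decomposition; same O(n) cost).

-- helpers shared by both ports (the same subexpressions occur verbatim in both Pythons)
-- "source" in line.lower() or "reference" in line.lower() or "citation" in line.lower()
def pvHasKw (line : String) : Bool :=
  PySem.Str.isIn "source" (PySem.Str.lower line) || PySem.Str.isIn "reference" (PySem.Str.lower line) ||
    PySem.Str.isIn "citation" (PySem.Str.lower line)

-- line.startswith(("-", "*", "•"))
def pvIsBullet (line : String) : Bool :=
  PySem.Str.startswith line "-" || PySem.Str.startswith line "*" || PySem.Str.startswith line "•"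

-- line.lstrip("-*• "): drop leading chars of that set (exact; PySem has no left-only chars strip)
def pvLstripBul (line : String) : String :=
  String.ofList (line.toList.dropWhile (fun c => c == '-' || c == '*' || c == '•' || c == ' '))

-- line.startswith("http") or line[0].isdigit(); both Pythons evaluate line[0] only on
-- nonempty lines (B writes 'l and l[0].isdigit()'), [] ↦ false is exact there
def pvSrcStart (line : String) : Bool :=
  PySem.Str.startswith line "http" ||
    (match line.toList with
     | [] => false
     | c :: _ => PySem.Chars.isdigit c)

-- ===== PORT A =====
-- A's loop body on the already-stripped line; state = (in_sources, key_points, sources)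
def pvStepStripped (st : Bool × List String × List String) (line : String) :
    Bool × List String × List String :=
  if line = "" then st
  else if pvHasKw line then (true, st.2.1, st.2.2)
  else if st.1 && pvSrcStart line then (st.1, st.2.1, st.2.2 ++ [line])
  else if !st.1 && pvIsBullet line then (st.1, st.2.1 ++ [pvLstripBul line], st.2.2)
  else st

-- A's loop body on the raw line: line = line.strip(), then the branches
def pvStepA (st : Bool × List String × List String) (line0 : String) :
    Bool × List String × List String :=
  pvStepStripped st (PySem.Str.strip line0)

def extract_structured_py (raw : String) (topic : String) : List (String × List String) :=
  let lines := (PySem.Str.split? raw "\n").getD []   -- raw.split("\n"); sep ≠ "" so never none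
  let st := lines.foldl pvStepA (false, [], [])
  [("key_points", PySem.List.slice st.2.1 none (some 15)),
   ("sources", PySem.List.slice st.2.2 none (some 10))]

-- ===== PORT B =====
def extract_structured_py_alt (raw : String) (topic : String) : List (String × List String) :=
  let ls := ((PySem.Str.split? raw "\n").getD []).map PySem.Str.strip
  -- next((i for i, l in enumerate(lines) if has_kw(l)), len(lines))
  let pivot := (ls.findIdx? pvHasKw).getD ls.length
  let key_points := ((ls.take pivot).filter pvIsBullet).map pvLstripBul
  let sources := (ls.drop (pivot + 1)).filter (fun l => !pvHasKw l && pvSrcStart l)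
  [("key_points", key_points.take 15), ("sources", sources.take 10)]

-- ===== PRECONDITION & SPEC =====
def Spec_extract_structured_py (raw : String) (topic : String) (out : List (String × List String)) : Prop := out = extract_structured_py_alt raw topic
instance (raw : String) (topic : String) (out : List (String × List String)) : Decidable (Spec_extract_structured_py raw topic out) := by unfold Spec_extract_structured_py; infer_instance

-- ===== CLAIM (what is proved, stated in full; the proofs are below) =====
def Claim_equal_extract_structured_py : Prop := ∀ (raw : String) (topic : String), Dom_extract_structured_py raw topic → Spec_extract_structured_py raw topic (extract_structured_py raw topic)

-- ===== LEMMAS AND PROOFS =====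

-- once in_sources is latched, the rest of the loop only collects the source lines
lemma pv_loopTrue (ls : List String) (kps srcs : List String) :
    ls.foldl pvStepStripped (true, kps, srcs) =
      (true, kps, srcs ++ ls.filter (fun l => !pvHasKw l && pvSrcStart l)) := by
  induction ls generalizing srcs with
  | nil => simp
  | cons l ls ih =>
    rw [List.foldl_cons, List.filter_cons]
    by_cases h0 : l = ""
    · subst h0
      have hf : (!pvHasKw "" && pvSrcStart "") = false := by decide
      simp [pvStepStripped, hf, ih]
    · by_cases hk : pvHasKw l = true
      · simp [pvStepStripped, h0, hk, ih]
      · by_cases hs : pvSrcStart l = true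
        · simp [pvStepStripped, h0, hk, hs, ih]
        · simp [pvStepStripped, h0, hk, hs, ih]

-- before the flag is latched, the loop is B's pivot decomposition
lemma pv_loopFalse (ls : List String) (kps srcs : List String) :
    (ls.foldl pvStepStripped (false, kps, srcs)).2 =
      (kps ++ ((ls.take ((ls.findIdx? pvHasKw).getD ls.length)).filter pvIsBullet).map pvLstripBul,
       srcs ++ (ls.drop ((ls.findIdx? pvHasKw).getD ls.length + 1)).filter
         (fun l => !pvHasKw l && pvSrcStart l)) := by
  induction ls generalizing kps srcs with
  | nil => simp
  | cons l ls ih =>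
    by_cases hk : pvHasKw l = true
    · have h0 : ¬ l = "" := by
        intro e; rw [e] at hk; exact absurd hk (by decide)
      rw [List.foldl_cons, show pvStepStripped (false, kps, srcs) l = (true, kps, srcs) from by
        simp [pvStepStripped, h0, hk]]
      rw [pv_loopTrue]
      simp [List.findIdx?_cons, hk]
    · by_cases hb : pvIsBullet l = true
      · have h0 : ¬ l = "" := by
          intro e; rw [e] at hb; exact absurd hb (by decide)
        rw [List.foldl_cons, show pvStepStripped (false, kps, srcs) l =
            (false, kps ++ [pvLstripBul l], srcs) from by
          simp [pvStepStripped, h0, hk, hb]]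
        rw [ih]
        rw [List.findIdx?_cons]
        cases hfi : List.findIdx? pvHasKw ls with
        | none => simp [hk, hb, List.append_assoc]
        | some i => simp [hk, hb, List.append_assoc]
      · rw [List.foldl_cons, show pvStepStripped (false, kps, srcs) l = (false, kps, srcs) from by
          by_cases h0 : l = "" <;> simp [pvStepStripped, h0, hk, hb]]
        rw [ih]
        rw [List.findIdx?_cons]
        cases hfi : List.findIdx? pvHasKw ls with
        | none => simp [hk, hb]
        | some i => simp [hk, hb]

-- ===== VERDICT (by name: the statement is the Claim_ definition above) =====
theorem extract_structured_py_spec : Claim_equal_extract_structured_py := by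
  intro raw topic _
  show extract_structured_py raw topic = extract_structured_py_alt raw topic
  unfold extract_structured_py extract_structured_py_alt
  dsimp only
  have hfold : ((PySem.Str.split? raw "\n").getD []).foldl pvStepA
      ((false : Bool), ([] : List String), ([] : List String)) =
      (((PySem.Str.split? raw "\n").getD []).map PySem.Str.strip).foldl pvStepStripped
        (false, [], []) := by
    rw [List.foldl_map]; rfl
  rw [hfold]
  rw [pv_loopFalse]
  rw [PySem.List.slice_to _ (by norm_num), PySem.List.slice_to _ (by norm_num)]
  rfl
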